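-- pv_equiv track=rewrite | github.com/algorithm-studyy/algorithm | jiwon/programmers/python/that_song.py | change_melody
-- ===== SOURCE A (Python) =====
-- melody_map = {k: v for k, v in zip(['C#', 'D#', 'F#', 'G#', 'A#'], ['c', 'd', 'f', 'g', 'a'])}
--
-- def change_melody(melody):
--     result = ''
--     i = 0
--     while i < len(melody):
--         if i < len(melody) - 1:
--             melody_part = melody[i:i+2]
--             if melody_part in melody_map:
--                 result += melody_map[melody_part]
--                 i += 2
--                 continue
--         result += melody[i]
--         i += 1
--     return result
-- ===== SOURCE B (Python) =====
-- NOTE_LOW = {'C': 'c', 'D': 'd', 'F': 'f', 'G': 'g', 'A': 'a'}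
--
-- def change_melody(melody):
--     stack = list(melody)
--     out = []
--     while stack:
--         c = stack.pop()
--         if c == '#' and stack and stack[-1] in NOTE_LOW:
--             out.append(NOTE_LOW[stack.pop()])
--         else:
--             out.append(c)
--     out.reverse()
--     return ''.join(out)
-- ===== Notes on version B (the rewrite author's own statement) =====
-- stated objective: faster
-- what changed: Replaces the index-based left-to-right window scan that grows the result by repeated string concatenation with a right-to-left stack traversal keyed on '#' that pairs each sharp with the preceding note character, collects pieces in a list and joins once.
import Mathlib
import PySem

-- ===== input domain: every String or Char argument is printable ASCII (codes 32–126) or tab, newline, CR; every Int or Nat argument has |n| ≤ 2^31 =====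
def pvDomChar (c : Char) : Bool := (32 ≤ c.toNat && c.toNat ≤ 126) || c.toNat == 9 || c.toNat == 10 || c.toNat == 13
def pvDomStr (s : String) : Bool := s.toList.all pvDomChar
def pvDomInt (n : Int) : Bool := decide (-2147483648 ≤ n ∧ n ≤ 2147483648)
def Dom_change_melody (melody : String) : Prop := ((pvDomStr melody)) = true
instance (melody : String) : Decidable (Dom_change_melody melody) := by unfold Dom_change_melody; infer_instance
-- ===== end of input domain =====

-- B replaces A's left-to-right index/window scan (which grows the result by repeated string
-- concatenation) by a right-to-left stack pass pairing each sharp with the preceding note,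
-- joining the collected pieces once at the end (measured faster at large sizes).

-- ===== PORT A =====
-- melody_map = {k: v for k, v in zip(['C#', 'D#', 'F#', 'G#', 'A#'], ['c', 'd', 'f', 'g', 'a'])}
-- (strings handled at the List Char level throughout, exact on the domain)
def pvMelodyMap : PySem.Dict (List Char) (List Char) :=
  PySem.Dict.ofList (List.zip [['C','#'],['D','#'],['F','#'],['G','#'],['A','#']] [['c'],['d'],['f'],['g'],['a']])

-- the while loop: result accumulator, index i (i only ever increases from 0, so Nat locally)
def pvLoopA (s : List Char) (i : Nat) (result : List Char) : List Char :=
  if _h : i < s.length then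
    if i < s.length - 1 ∧ (pvMelodyMap.get? (PySem.List.slice s (some (i : Int)) (some ((i : Int) + 2)))).isSome then
      pvLoopA s (i + 2) (result ++ (pvMelodyMap.get? (PySem.List.slice s (some (i : Int)) (some ((i : Int) + 2)))).getD [])
    else
      pvLoopA s (i + 1) (result ++ [(PySem.List.pyGet? s (i : Int)).getD ' '])
  else result
termination_by s.length - i

def change_melody (melody : String) : String :=
  String.ofList (pvLoopA melody.toList 0 [])

-- ===== PORT B =====
-- NOTE_LOW = {'C': 'c', 'D': 'd', 'F': 'f', 'G': 'g', 'A': 'a'}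
def pvNoteLow : PySem.Dict Char Char :=
  PySem.Dict.ofList [('C','c'),('D','d'),('F','f'),('G','g'),('A','a')]

-- the while loop over stack (list(melody), popped from the end = head of the reversed list);
-- out is appended then reversed at the end, modelled as prepending to the final list
def pvLoopB (stack : List Char) (out : List Char) : List Char :=
  match stack with
  | [] => out
  | [c] => pvLoopB [] (c :: out)
  | c :: d :: rest =>
      if c = '#' ∧ (pvNoteLow.get? d).isSome then
        pvLoopB rest ((pvNoteLow.get? d).getD d :: out)
      else
        pvLoopB (d :: rest) (c :: out)
termination_by stack.length

def change_melody_alt (melody : String) : String :=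
  String.ofList (pvLoopB melody.toList.reverse [])

-- ===== PRECONDITION & SPEC =====
def Spec_change_melody (melody : String) (out : String) : Prop := out = change_melody_alt melody
instance (melody : String) (out : String) : Decidable (Spec_change_melody melody out) := by unfold Spec_change_melody; infer_instance

-- ===== CLAIM (what is proved, stated in full; the proofs are below) =====
def Claim_equal_change_melody : Prop := ∀ (melody : String), Dom_change_melody melody → Spec_change_melody melody (change_melody melody)

-- ===== LEMMAS AND PROOFS =====

-- left-to-right greedy spec (A's shape)
def pvConvL : List Char → List Char
  | [] => []
  | [a] => [a]
  | a :: b :: t =>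
      if (pvMelodyMap.get? [a, b]).isSome then
        (pvMelodyMap.get? [a, b]).getD [] ++ pvConvL t
      else
        a :: pvConvL (b :: t)
termination_by l => l.length

-- right-to-left greedy spec (B's shape, on the reversed list, output in original order)
def pvConvQ : List Char → List Char
  | [] => []
  | [c] => [c]
  | c :: d :: rest =>
      if c = '#' ∧ (pvNoteLow.get? d).isSome then
        pvConvQ rest ++ [(pvNoteLow.get? d).getD d]
      else
        pvConvQ (d :: rest) ++ [c]
termination_by l => l.length

theorem pvMelodyMap_get (a b : Char) :
    pvMelodyMap.get? [a, b] =
      if b = '#' then (pvNoteLow.get? a).map (fun v => [v]) else none := by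
  have h1 : pvMelodyMap = PySem.Dict.mk [(['C','#'],['c']),(['D','#'],['d']),(['F','#'],['f']),(['G','#'],['g']),(['A','#'],['a'])] := by decide
  have h2 : pvNoteLow = PySem.Dict.mk [('C','c'),('D','d'),('F','f'),('G','g'),('A','a')] := by decide
  rw [h1, h2]
  simp only [PySem.Dict.get?_mk_cons]
  simp [Option.map]
  by_cases hb : b = '#' <;> by_cases hC : a = 'C' <;> by_cases hD : a = 'D' <;>
    by_cases hF : a = 'F' <;> by_cases hG : a = 'G' <;> by_cases hA : a = 'A' <;>
    simp_all [PySem.Dict.get?, eq_comm]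

theorem pvLoopA_eq (s : List Char) (i : Nat) (result : List Char) :
    pvLoopA s i result = result ++ pvConvL (s.drop i) := by
  fun_induction pvLoopA s i result with
  | case1 i result h hc ih =>
    have hi1 : i + 1 < s.length := by omega
    have hcast : (i : Int) + 2 = ((i + 2 : Nat) : Int) := by push_cast; ring
    have hslice : PySem.List.slice s (some (i : Int)) (some ((i : Int) + 2)) = [s[i], s[i+1]] := by
      rw [hcast, PySem.List.slice_natCast, show i + 2 - i = 2 by omega]
      rw [List.drop_eq_getElem_cons h, List.drop_eq_getElem_cons hi1]
      rw [List.take_succ_cons, List.take_succ_cons, List.take_zero]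
    have hdrop : s.drop i = s[i] :: s[i+1] :: s.drop (i + 2) := by
      rw [List.drop_eq_getElem_cons h, List.drop_eq_getElem_cons hi1]
    rw [ih, hdrop]
    rw [hslice] at hc
    rw [pvConvL, if_pos hc.2]
    simp [hslice]
  | case2 i result h hc ih =>
    rw [ih]
    have hget : (PySem.List.pyGet? s (i : Int)).getD ' ' = s[i] := by
      simp [List.getElem?_eq_getElem h]
    by_cases h1 : i + 1 < s.length
    · have hdrop : s.drop i = s[i] :: s[i+1] :: s.drop (i + 2) := by
        rw [List.drop_eq_getElem_cons h, List.drop_eq_getElem_cons h1]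
      have hdrop1 : s.drop (i + 1) = s[i+1] :: s.drop (i + 2) := by
        rw [List.drop_eq_getElem_cons h1]
      have hcast : (i : Int) + 2 = ((i + 2 : Nat) : Int) := by push_cast; ring
      have hslice : PySem.List.slice s (some (i : Int)) (some ((i : Int) + 2)) = [s[i], s[i+1]] := by
        rw [hcast, PySem.List.slice_natCast, show i + 2 - i = 2 by omega, hdrop]
        rw [List.take_succ_cons, List.take_succ_cons, List.take_zero]
      have hns : (pvMelodyMap.get? [s[i], s[i+1]]).isSome = false := by
        rw [hslice] at hc
        simp only [not_and] at hc
        simpa using hc (by omega)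
      rw [hdrop, hdrop1, pvConvL, if_neg (by simp [hns]), hget]
      simp
    · have hdropE : s.drop (i + 1) = [] := List.drop_eq_nil_of_le (by omega)
      have hdrop : s.drop i = [s[i]] := by
        rw [List.drop_eq_getElem_cons h, hdropE]
      rw [hdrop, hdropE, pvConvL, hget]
      simp [pvConvL]
  | case3 i result h =>
    rw [List.drop_eq_nil_of_le (by omega), pvConvL]
    simp

theorem pvLoopB_eq (stack out : List Char) :
    pvLoopB stack out = pvConvQ stack ++ out := by
  fun_induction pvLoopB stack out with
  | case1 out => simp [pvConvQ]
  | case2 out c ih => simp_all [pvConvQ, pvLoopB]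
  | case3 out c d rest hc ih => simp only [ih, pvConvQ, if_pos hc, List.append_assoc, List.cons_append, List.nil_append]
  | case4 out c d rest hc ih => simp only [ih, pvConvQ, if_neg hc, List.append_assoc, List.cons_append, List.nil_append]

-- appending a non-note on the left end of the original string (= right end of the stack)
theorem pvConvQ_append_nonnote (r : List Char) (a : Char)
    (ha : (pvNoteLow.get? a).isSome = false) :
    pvConvQ (r ++ [a]) = a :: pvConvQ r := by
  fun_induction pvConvQ r with
  | case1 => simp [pvConvQ]
  | case2 c =>
    simp [pvConvQ, ha]
  | case3 c d rest hc ih =>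
    simp only [List.cons_append, pvConvQ, if_pos hc, ih]
  | case4 c d rest hc ih =>
    simp only [List.cons_append] at ih ⊢
    simp only [pvConvQ, if_neg hc, ih]
    simp

-- appending a matched pair "a#" on the left end of the original string
theorem pvConvQ_append_pair (r : List Char) (a : Char)
    (ha : (pvNoteLow.get? a).isSome) :
    pvConvQ (r ++ ['#', a]) = (pvNoteLow.get? a).getD a :: pvConvQ r := by
  fun_induction pvConvQ r with
  | case1 =>
    simp [pvConvQ, Option.isSome_iff_ne_none.mp ha]
  | case2 c =>
    simp [pvConvQ, ha,
      show pvNoteLow.get? '#' = none by decide]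
  | case3 c d rest hc ih =>
    simp only [List.cons_append] at ih ⊢
    simp only [pvConvQ, if_pos hc, ih, List.cons_append]
  | case4 c d rest hc ih =>
    simp only [List.cons_append] at ih ⊢
    simp only [pvConvQ, if_neg hc, ih, List.cons_append]

-- appending a note not followed by '#'
theorem pvConvQ_append_note (r : List Char) (a : Char)
    (_ha : (pvNoteLow.get? a).isSome) (hr : r.getLast? ≠ some '#') :
    pvConvQ (r ++ [a]) = a :: pvConvQ r := by
  fun_induction pvConvQ r with
  | case1 => simp [pvConvQ]
  | case2 c =>
    have hcne : c ≠ '#' := by simpa using hr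
    simp [pvConvQ, hcne]
  | case3 c d rest hc ih =>
    have hrest : rest.getLast? ≠ some '#' := by
      cases rest with
      | nil => simp
      | cons x xs => rw [List.getLast?_cons_cons, List.getLast?_cons_cons] at hr; exact hr
    simp only [List.cons_append, pvConvQ, if_pos hc, ih hrest]
  | case4 c d rest hc ih =>
    have hrest : (d :: rest).getLast? ≠ some '#' := by
      rw [List.getLast?_cons_cons] at hr; exact hr
    simp only [List.cons_append] at ih ⊢
    simp only [pvConvQ, if_neg hc, ih hrest]
    simp

theorem pvConv_bridge (l : List Char) : pvConvQ l.reverse = pvConvL l := by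
  fun_induction pvConvL l with
  | case1 => simp [pvConvQ]
  | case2 a => simp [pvConvQ]
  | case3 a b t hc ih =>
    rw [pvMelodyMap_get] at hc
    by_cases hb : b = '#'
    · subst hb
      rw [if_pos rfl] at hc
      simp only [Option.isSome_map] at hc
      have hrev : (a :: '#' :: t).reverse = t.reverse ++ ['#', a] := by simp
      rw [hrev, pvConvQ_append_pair _ _ hc, ih]
      rw [pvMelodyMap_get, if_pos rfl]
      cases hget : pvNoteLow.get? a with
      | none => rw [hget] at hc; simp at hc
      | some v => simp
    · rw [if_neg hb] at hc; simp at hc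
  | case4 a b t hc ih =>
    rw [pvMelodyMap_get] at hc
    have hrev : (a :: b :: t).reverse = (b :: t).reverse ++ [a] := by simp
    by_cases hna : (pvNoteLow.get? a).isSome
    · have hb : b ≠ '#' := by
        intro hbe; subst hbe
        rw [if_pos rfl] at hc
        simp [Option.isSome_map, hna] at hc
      have hlast : (b :: t).reverse.getLast? ≠ some '#' := by
        rw [List.getLast?_reverse]
        simpa using hb
      rw [hrev, pvConvQ_append_note _ _ hna hlast, ih]
    · rw [hrev, pvConvQ_append_nonnote _ _ (by simpa using hna), ih]

-- ===== VERDICT (by name: the statement is the Claim_ definition above) =====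
theorem change_melody_spec : Claim_equal_change_melody := by
  intro melody _
  unfold Spec_change_melody change_melody change_melody_alt
  rw [pvLoopA_eq, pvLoopB_eq, List.drop_zero, pvConv_bridge]
  simp
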